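-- pv_equiv track=rewrite | github.com/navipilot/openpilot | selfdrive/carrot/server/core.py | _match_remote_ref
-- ===== SOURCE A (Python) =====
-- from typing import Dict, Any, Tuple, Optional, List
--
-- def _match_remote_ref(ref: str, remotes: list[str]) -> Optional[tuple[str, str]]:
--   for remote in sorted(remotes, key=len, reverse=True):
--     prefix = f"{remote}/"
--     if not ref.startswith(prefix):
--       continue
--     name = ref[len(prefix):].strip()
--     if name and name != "HEAD":
--       return remote, name
--   return None
-- ===== SOURCE B (Python) =====
-- from typing import Optional
--
-- def _match_remote_ref(ref: str, remotes: list[str]) -> Optional[tuple[str, str]]: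
--   # Different algorithm: instead of sorting the remotes by length and scanning
--   # them, walk the slash positions of ref from right to left; the first
--   # position whose prefix is a known remote and whose remaining name is a
--   # valid ref name yields the longest-remote match.
--   rset = set(remotes)
--   for i in range(len(ref) - 1, -1, -1):
--     if ref[i] != "/":
--       continue
--     if ref[:i] not in rset:
--       continue
--     name = ref[i + 1:].strip()
--     if name and name != "HEAD":
--       return ref[:i], name
--   return None
-- ===== Notes on version B (the rewrite author's own statement) =====
-- stated objective: faster
-- what changed: Replaced sort-remotes-by-length-then-first-match with a right-to-left scan over the slash positions of ref, testing each prefix against a hash set of the remotes; the first valid position is the longest-remote match.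
import Mathlib
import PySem

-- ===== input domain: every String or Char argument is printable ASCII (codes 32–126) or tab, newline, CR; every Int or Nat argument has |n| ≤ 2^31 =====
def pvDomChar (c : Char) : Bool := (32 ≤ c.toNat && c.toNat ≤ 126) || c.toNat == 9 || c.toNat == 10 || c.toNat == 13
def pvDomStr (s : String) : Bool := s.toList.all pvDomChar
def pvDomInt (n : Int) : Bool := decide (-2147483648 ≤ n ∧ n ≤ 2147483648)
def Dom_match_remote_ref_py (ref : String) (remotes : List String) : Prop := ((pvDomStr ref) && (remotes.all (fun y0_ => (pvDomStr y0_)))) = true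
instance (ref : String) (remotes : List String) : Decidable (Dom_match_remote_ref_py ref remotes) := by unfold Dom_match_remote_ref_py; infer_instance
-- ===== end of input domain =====

-- B replaces A's sort-remotes-by-length-then-first-match with a right-to-left scan over
-- the slash positions of ref against a set of the remotes; equality is proved on all inputs.

-- ===== PORT A =====
-- the 'for remote in sorted(...)' loop body of A, run over the already-sorted list
def matchA_go (ref : String) : List String → Option (String × String)
  | [] => none
  | remote :: rest =>
      let pre := remote ++ "/"
      if PySem.Str.startswith ref pre then
        let name := PySem.Str.strip (PySem.Str.slice ref (some (PySem.Str.len pre)) none)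
        if name ≠ "" ∧ name ≠ "HEAD" then some (remote, name)
        else matchA_go ref rest
      else matchA_go ref rest

def match_remote_ref_py (ref : String) (remotes : List String) : Option (String × String) :=
  matchA_go ref (PySem.List.sorted remotes (fun r => PySem.Str.len r) true)

-- ===== PORT B =====
-- the 'for i in range(len(ref)-1, -1, -1)' loop of B: fuel i+1 means current index i
-- (ref[i] in Python is a 1-char string compared with "/"; ported as the char at i compared with '/')
def matchB_go (ref : String) (rset : PySem.Set String) : Nat → Option (String × String)
  | 0 => none
  | i + 1 =>
      if PySem.Str.pyGet? ref (i : Int) = some '/' then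
        let pfx := PySem.Str.slice ref none (some (i : Int))
        if PySem.Set.contains rset pfx then
          let name := PySem.Str.strip (PySem.Str.slice ref (some ((i : Int) + 1)) none)
          if name ≠ "" ∧ name ≠ "HEAD" then some (pfx, name)
          else matchB_go ref rset i
        else matchB_go ref rset i
      else matchB_go ref rset i

def match_remote_ref_py_alt (ref : String) (remotes : List String) : Option (String × String) :=
  matchB_go ref (PySem.Set.ofList remotes) ref.toList.length

-- ===== PRECONDITION & SPEC =====
def Spec_match_remote_ref_py (ref : String) (remotes : List String) (out : Option (String × String)) : Prop := out = match_remote_ref_py_alt ref remotes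
instance (ref : String) (remotes : List String) (out : Option (String × String)) : Decidable (Spec_match_remote_ref_py ref remotes out) := by unfold Spec_match_remote_ref_py; infer_instance

-- ===== CLAIM (what is proved, stated in full; the proofs are below) =====
def Claim_equal_match_remote_ref_py : Prop := ∀ (ref : String) (remotes : List String), Dom_match_remote_ref_py ref remotes → Spec_match_remote_ref_py ref remotes (match_remote_ref_py ref remotes)

-- ===== LEMMAS AND PROOFS =====

/-- The name A computes for a matching remote. -/
def pvName (ref remote : String) : String :=
  PySem.Str.strip (PySem.Str.slice ref (some (PySem.Str.len (remote ++ "/"))) none)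

/-- The "valid match" condition of A's loop body. -/
def pvValid (ref remote : String) : Prop :=
  PySem.Str.startswith ref (remote ++ "/") = true ∧
    pvName ref remote ≠ "" ∧ pvName ref remote ≠ "HEAD"

/-- The name B computes at slash position `i`. -/
def pvNameI (ref : String) (i : Nat) : String :=
  PySem.Str.strip (PySem.Str.slice ref (some ((i : Int) + 1)) none)

/-- The "valid position" condition of B's loop body. -/
def pvIdxValid (ref : String) (remotes : List String) (i : Nat) : Prop :=
  ref.toList[i]? = some '/' ∧ PySem.Str.slice ref none (some (i : Int)) ∈ remotes ∧
    pvNameI ref i ≠ "" ∧ pvNameI ref i ≠ "HEAD"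

theorem matchA_go_cons_pos {ref remote : String} (rest : List String)
    (hv : pvValid ref remote) :
    matchA_go ref (remote :: rest) = some (remote, pvName ref remote) := by
  show (if PySem.Str.startswith ref (remote ++ "/") then
          if pvName ref remote ≠ "" ∧ pvName ref remote ≠ "HEAD"
          then some (remote, pvName ref remote)
          else matchA_go ref rest
        else matchA_go ref rest) = _
  rw [if_pos hv.1, if_pos ⟨hv.2.1, hv.2.2⟩]

theorem matchA_go_cons_neg {ref remote : String} (rest : List String)
    (hv : ¬ pvValid ref remote) :
    matchA_go ref (remote :: rest) = matchA_go ref rest := by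
  show (if PySem.Str.startswith ref (remote ++ "/") then
          if pvName ref remote ≠ "" ∧ pvName ref remote ≠ "HEAD"
          then some (remote, pvName ref remote)
          else matchA_go ref rest
        else matchA_go ref rest) = _
  by_cases hs : PySem.Str.startswith ref (remote ++ "/") = true
  · rw [if_pos hs, if_neg (fun hn => hv ⟨hs, hn.1, hn.2⟩)]
  · rw [if_neg (by simpa using hs)]

theorem matchA_go_eq_some {ref : String} {xs : List String} {p : String × String}
    (h : matchA_go ref xs = some p) :
    ∃ r, p = (r, pvName ref r) ∧ r ∈ xs ∧ pvValid ref r := by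
  induction xs with
  | nil => simp [matchA_go] at h
  | cons remote rest ih =>
    by_cases hv : pvValid ref remote
    · rw [matchA_go_cons_pos rest hv] at h
      exact ⟨remote, (Option.some_injective _ h).symm, by simp, hv⟩
    · rw [matchA_go_cons_neg rest hv] at h
      obtain ⟨r, hp, hmem, hv'⟩ := ih h
      exact ⟨r, hp, by simp [hmem], hv'⟩

theorem matchA_go_eq_none {ref : String} {xs : List String}
    (h : matchA_go ref xs = none) : ∀ r ∈ xs, ¬ pvValid ref r := by
  induction xs with
  | nil => simp
  | cons remote rest ih =>
    by_cases hv : pvValid ref remote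
    · rw [matchA_go_cons_pos rest hv] at h; exact absurd h (by simp)
    · rw [matchA_go_cons_neg rest hv] at h
      intro r hr
      rcases List.mem_cons.mp hr with hEq | hmem
      · exact hEq ▸ hv
      · exact ih h r hmem

/-- In a list pairwise descending by length, A's first match is length-maximal among valid remotes. -/
theorem matchA_go_maximal {ref : String} {xs : List String} {r n : String}
    (hp : List.Pairwise (fun a b => PySem.Str.len b ≤ PySem.Str.len a) xs)
    (h : matchA_go ref xs = some (r, n)) :
    ∀ r' ∈ xs, pvValid ref r' → PySem.Str.len r' ≤ PySem.Str.len r := by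
  induction xs with
  | nil => simp [matchA_go] at h
  | cons remote rest ih =>
    have hp' := List.pairwise_cons.mp hp
    by_cases hv : pvValid ref remote
    · rw [matchA_go_cons_pos rest hv] at h
      have hr : remote = r := congrArg Prod.fst (Option.some_injective _ h)
      subst hr
      intro r' hr' _
      rcases List.mem_cons.mp hr' with hEq | hmem
      · exact hEq ▸ le_refl _
      · exact hp'.1 r' hmem
    · rw [matchA_go_cons_neg rest hv] at h
      intro r' hr' hv'
      rcases List.mem_cons.mp hr' with hEq | hmem
      · exact absurd hv' (hEq ▸ hv)
      · exact ih hp'.2 h r' hmem hv'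

/-- A valid remote `r` yields the valid slash position `r.toList.length`. -/
theorem pv_toList_slice_to (s : String) (i : Nat) :
    (PySem.Str.slice s none (some (i : Int))).toList = s.toList.take i := by
  rw [PySem.Str.toList_slice]
  rw [show PySem.Chars.slice s.toList none (some (i : Int)) =
        PySem.List.slice s.toList none (some (i : Int)) from rfl]
  rw [PySem.List.slice_to_natCast]

theorem idxValid_of_valid {ref r : String} {remotes : List String}
    (hmem : r ∈ remotes) (hv : pvValid ref r) :
    pvIdxValid ref remotes r.toList.length ∧
      PySem.Str.slice ref none (some (r.toList.length : Int)) = r ∧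
      pvNameI ref r.toList.length = pvName ref r := by
  obtain ⟨hs, h1, h2⟩ := hv
  rw [PySem.Str.startswith_eq, PySem.Chars.startswith_iff, String.toList_append] at hs
  obtain ⟨t, ht⟩ := hs
  have hchar : ref.toList[r.toList.length]? = some '/' := by
    rw [← ht]
    have : r.toList ++ "/".toList ++ t = r.toList ++ ('/' :: t) := by simp
    rw [this, List.getElem?_append_right (le_refl _)]
    simp
  have hpfx : PySem.Str.slice ref none (some (r.toList.length : Int)) = r := by
    apply String.toList_injective
    rw [pv_toList_slice_to, ← ht]
    have : r.toList ++ "/".toList ++ t = r.toList ++ ('/' :: t) := by simp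
    rw [this, List.take_append_of_le_length (le_refl _)]
    simp
  have hlen : PySem.Str.len (r ++ "/") = (r.toList.length : Int) + 1 := by
    rw [PySem.Str.len_eq, String.toList_append]
    simp
  have hname : pvNameI ref r.toList.length = pvName ref r := by
    unfold pvNameI pvName
    rw [hlen]
  refine ⟨⟨hchar, ?_, ?_, ?_⟩, hpfx, hname⟩
  · rw [hpfx]; exact hmem
  · rw [hname]; exact h1
  · rw [hname]; exact h2

/-- A valid slash position `i` yields a valid remote: the prefix of length `i`. -/
theorem valid_of_idxValid {ref : String} {remotes : List String} {i : Nat}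
    (h : pvIdxValid ref remotes i) :
    ∃ r, PySem.Str.slice ref none (some (i : Int)) = r ∧ r ∈ remotes ∧
      pvValid ref r ∧ r.toList.length = i ∧ pvName ref r = pvNameI ref i := by
  obtain ⟨hchar, hmem, h1, h2⟩ := h
  set r := PySem.Str.slice ref none (some (i : Int)) with hr
  have hlt : i < ref.toList.length := (List.getElem?_eq_some_iff.mp hchar).1
  have hrl : r.toList = ref.toList.take i := by
    rw [hr, pv_toList_slice_to]
  have hrlen : r.toList.length = i := by rw [hrl, List.length_take]; omega
  have hs : PySem.Str.startswith ref (r ++ "/") = true := by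
    rw [PySem.Str.startswith_eq, PySem.Chars.startswith_iff, String.toList_append, hrl]
    have hsplit : ref.toList.take (i + 1) = ref.toList.take i ++ ['/'] := by
      rw [List.take_add_one]
      simp [hchar]
    have : ref.toList.take i ++ "/".toList = ref.toList.take (i + 1) := by
      rw [hsplit]; rfl
    rw [this]
    exact List.take_prefix _ _
  have hlen : PySem.Str.len (r ++ "/") = (i : Int) + 1 := by
    rw [PySem.Str.len_eq, String.toList_append, List.length_append, hrl, List.length_take]
    have : "/".toList.length = 1 := rfl
    rw [this]
    omega
  have hname : pvName ref r = pvNameI ref i := by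
    unfold pvNameI pvName
    rw [hlen]
  exact ⟨r, rfl, hmem, ⟨hs, hname ▸ h1, hname ▸ h2⟩, hrlen, hname⟩

theorem matchB_go_step_pos {ref : String} {remotes : List String} {i : Nat}
    (hv : pvIdxValid ref remotes i) :
    matchB_go ref (PySem.Set.ofList remotes) (i + 1) =
      some (PySem.Str.slice ref none (some (i : Int)), pvNameI ref i) := by
  show (if PySem.Str.pyGet? ref (i : Int) = some '/' then
          if PySem.Set.contains (PySem.Set.ofList remotes) (PySem.Str.slice ref none (some (i : Int))) then
            if pvNameI ref i ≠ "" ∧ pvNameI ref i ≠ "HEAD" then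
              some (PySem.Str.slice ref none (some (i : Int)), pvNameI ref i)
            else matchB_go ref (PySem.Set.ofList remotes) i
          else matchB_go ref (PySem.Set.ofList remotes) i
        else matchB_go ref (PySem.Set.ofList remotes) i) = _
  obtain ⟨hc, hm, h1, h2⟩ := hv
  rw [if_pos (by simpa using hc),
      if_pos ((PySem.Set.contains_iff _ _).mpr ((PySem.Set.mem_ofList _ _).mpr hm)),
      if_pos ⟨h1, h2⟩]

theorem matchB_go_step_neg {ref : String} {remotes : List String} {i : Nat}
    (hv : ¬ pvIdxValid ref remotes i) :
    matchB_go ref (PySem.Set.ofList remotes) (i + 1) =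
      matchB_go ref (PySem.Set.ofList remotes) i := by
  show (if PySem.Str.pyGet? ref (i : Int) = some '/' then
          if PySem.Set.contains (PySem.Set.ofList remotes) (PySem.Str.slice ref none (some (i : Int))) then
            if pvNameI ref i ≠ "" ∧ pvNameI ref i ≠ "HEAD" then
              some (PySem.Str.slice ref none (some (i : Int)), pvNameI ref i)
            else matchB_go ref (PySem.Set.ofList remotes) i
          else matchB_go ref (PySem.Set.ofList remotes) i
        else matchB_go ref (PySem.Set.ofList remotes) i) = _
  by_cases hc : ref.toList[i]? = some '/'
  · rw [if_pos (by simpa using hc)]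
    by_cases hm : PySem.Str.slice ref none (some (i : Int)) ∈ remotes
    · rw [if_pos ((PySem.Set.contains_iff _ _).mpr ((PySem.Set.mem_ofList _ _).mpr hm))]
      rw [if_neg (fun hn => hv ⟨hc, hm, hn.1, hn.2⟩)]
    · rw [if_neg (fun hh => hm ((PySem.Set.mem_ofList _ _).mp ((PySem.Set.contains_iff _ _).mp hh)))]
  · rw [if_neg (by simpa using hc)]

theorem matchB_go_eq_none {ref : String} {remotes : List String} {fuel : Nat}
    (h : ∀ i < fuel, ¬ pvIdxValid ref remotes i) :
    matchB_go ref (PySem.Set.ofList remotes) fuel = none := by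
  induction fuel with
  | zero => rfl
  | succ i ih =>
    rw [matchB_go_step_neg (h i (by omega))]
    exact ih (fun j hj => h j (by omega))

theorem matchB_go_eq_some {ref : String} {remotes : List String} {fuel i : Nat}
    (hi : i < fuel) (hv : pvIdxValid ref remotes i)
    (hmax : ∀ j, i < j → j < fuel → ¬ pvIdxValid ref remotes j) :
    matchB_go ref (PySem.Set.ofList remotes) fuel =
      some (PySem.Str.slice ref none (some (i : Int)), pvNameI ref i) := by
  induction fuel with
  | zero => omega
  | succ k ih =>
    by_cases hik : i = k
    · subst hik; exact matchB_go_step_pos hv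
    · rw [matchB_go_step_neg (hmax k (by omega) (by omega))]
      exact ih (by omega) (fun j hj1 hj2 => hmax j hj1 (by omega))

-- ===== VERDICT (by name: the statement is the Claim_ definition above) =====
theorem match_remote_ref_py_spec : Claim_equal_match_remote_ref_py := by
  intro ref remotes _
  unfold Spec_match_remote_ref_py match_remote_ref_py match_remote_ref_py_alt
  have hmem : ∀ x, x ∈ PySem.List.sorted remotes (fun r => PySem.Str.len r) true ↔ x ∈ remotes :=
    fun x => PySem.List.mem_sorted remotes (fun r => PySem.Str.len r) true x
  have hpair := PySem.List.sorted_pairwise_rev remotes (fun r => PySem.Str.len r)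
  cases hA : matchA_go ref (PySem.List.sorted remotes (fun r => PySem.Str.len r) true) with
  | none =>
    have hnone : ∀ r ∈ remotes, ¬ pvValid ref r := fun r hr =>
      matchA_go_eq_none hA r ((hmem r).mpr hr)
    refine (matchB_go_eq_none ?_).symm
    intro i _ hiv
    obtain ⟨r, -, hrmem, hrv, -, -⟩ := valid_of_idxValid hiv
    exact hnone r hrmem hrv
  | some p =>
    obtain ⟨r, hp, hrmem, hrv⟩ := matchA_go_eq_some hA
    have hrmem' : r ∈ remotes := (hmem r).mp hrmem
    obtain ⟨hiv, hpfx, hnm⟩ := idxValid_of_valid hrmem' hrv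
    have hlt : r.toList.length < ref.toList.length :=
      (List.getElem?_eq_some_iff.mp hiv.1).1
    have hmax : ∀ j, r.toList.length < j → j < ref.toList.length →
        ¬ pvIdxValid ref remotes j := by
      intro j hj1 _ hjv
      obtain ⟨r', -, hmem', hv', hlen', -⟩ := valid_of_idxValid hjv
      have hle : PySem.Str.len r' ≤ PySem.Str.len r :=
        matchA_go_maximal hpair (hp ▸ hA) r' ((hmem r').mpr hmem') hv'
      rw [PySem.Str.len_eq, PySem.Str.len_eq] at hle
      have : r'.toList.length ≤ r.toList.length := by exact_mod_cast hle
      omega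
    rw [matchB_go_eq_some hlt hiv hmax, hpfx, hnm, hp]
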